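-- pv_equiv track=rewrite | github.com/salikovGit/Python_Basic_hw_3 | hw_3_2.py | get_pair_sum
-- ===== SOURCE A (Python) =====
-- def get_pair_sum(list_of_numbers):
--     '''
--     :param list_of_numbers: original list of integers
--     :return: list with products of paired elements of the original list
--     '''
--     result_list = []
--     if len(list_of_numbers) % 2 == 0:
--         for i in range(len(list_of_numbers) // 2):
--             result_list.append(list_of_numbers[i] * list_of_numbers[i*(-1) - 1])
--     else:
--         for i in range(len(list_of_numbers) // 2):
--             result_list.append(list_of_numbers[i] * list_of_numbers[i*(-1) - 1])
--         result_list.append((list_of_numbers[len(list_of_numbers) // 2 ])**2)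
--     return result_list
-- ===== SOURCE B (Python) =====
-- def get_pair_sum(list_of_numbers):
--     '''
--     :param list_of_numbers: original list of integers
--     :return: list with products of paired elements of the original list
--     '''
--     xs = list_of_numbers[::-1]   # stack whose pop() yields the front elements in order
--     ys = list(list_of_numbers)   # stack whose pop() yields the back elements in order
--     result = []
--     remaining = len(list_of_numbers)
--     while remaining > 1:
--         result.append(xs.pop() * ys.pop())
--         remaining -= 2
--     if remaining == 1:
--         m = xs.pop()
--         result.append(m * m)
--     return result
-- ===== Notes on version B (the rewrite author's own statement) =====
-- stated objective: alternative
-- what changed: Replaces the index loop over range(n//2) with negative mirror indexing and an even/odd branch by a peel-both-ends consumption: two stacks (the list and its reversal) are popped in lockstep while a countdown counter shrinks by 2, and a single leftover element is squared; no indexing and no parity branch over the whole list.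
import Mathlib
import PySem

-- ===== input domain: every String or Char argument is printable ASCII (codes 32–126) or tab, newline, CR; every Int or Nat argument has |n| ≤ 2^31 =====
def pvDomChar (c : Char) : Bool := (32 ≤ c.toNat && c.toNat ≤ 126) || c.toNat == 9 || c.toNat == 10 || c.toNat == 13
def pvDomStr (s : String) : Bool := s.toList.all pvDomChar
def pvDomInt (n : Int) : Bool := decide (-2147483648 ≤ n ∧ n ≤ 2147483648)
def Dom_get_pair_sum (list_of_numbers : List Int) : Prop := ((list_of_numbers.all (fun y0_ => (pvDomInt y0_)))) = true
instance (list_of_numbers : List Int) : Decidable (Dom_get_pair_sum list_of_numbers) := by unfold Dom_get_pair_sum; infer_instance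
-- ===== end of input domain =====

-- B replaces A's index loop (range(n//2), negative mirror index, even/odd branch) by a
-- peel-both-ends consumption: two stacks popped in lockstep under a countdown counter.

-- ===== PORT A =====
-- A: parallel-index loop over range(n//2) with negative mirror index, plus even/odd branch.
def get_pair_sum (list_of_numbers : List Int) : List Int :=
  let n : Int := list_of_numbers.length
  if PySem.Int.mod n 2 = 0 then
    (PySem.List.pyRange 0 (PySem.Int.floordiv n 2) 1).foldl
      (fun acc i => acc ++ [PySem.List.pyGetD list_of_numbers i 0 *
                            PySem.List.pyGetD list_of_numbers (i * (-1) - 1) 0]) []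
  else
    ((PySem.List.pyRange 0 (PySem.Int.floordiv n 2) 1).foldl
      (fun acc i => acc ++ [PySem.List.pyGetD list_of_numbers i 0 *
                            PySem.List.pyGetD list_of_numbers (i * (-1) - 1) 0]) [])
    ++ [(PySem.List.pyGetD list_of_numbers (PySem.Int.floordiv n 2) 0) ^ 2]

-- ===== PORT B =====
-- B's while loop: pop the two stacks in lockstep while the countdown `remaining` exceeds 1,
-- then square a single leftover.  The stack xs = l[::-1] yields, via pop(), the elements of l
-- front to back, and ys = list(l) yields them back to front; so the two pop() streams are
-- exactly `front` (= l) and `back` (= l.reverse), consumed head first.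
def goB (front back : List Int) (remaining : Int) (acc : List Int) : List Int :=
  if remaining > 1 then
    match front, back with
    | a :: f, b :: g => goB f g (remaining - 2) (acc ++ [a * b])
    | _, _ => acc        -- unreachable when called as in get_pair_sum_alt
  else if remaining = 1 then
    match front with
    | a :: _ => acc ++ [a * a]
    | [] => acc          -- unreachable when called as in get_pair_sum_alt
  else acc
termination_by front.length
decreasing_by simp

def get_pair_sum_alt (list_of_numbers : List Int) : List Int :=
  goB list_of_numbers list_of_numbers.reverse (list_of_numbers.length : Int) []

-- ===== PRECONDITION & SPEC =====
def Spec_get_pair_sum (list_of_numbers : List Int) (out : List Int) : Prop := out = get_pair_sum_alt list_of_numbers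
instance (list_of_numbers : List Int) (out : List Int) : Decidable (Spec_get_pair_sum list_of_numbers out) := by unfold Spec_get_pair_sum; infer_instance

-- ===== CLAIM (what is proved, stated in full; the proofs are below) =====
def Claim_equal_get_pair_sum : Prop := ∀ (list_of_numbers : List Int), Dom_get_pair_sum list_of_numbers → Spec_get_pair_sum list_of_numbers (get_pair_sum list_of_numbers)

-- ===== LEMMAS AND PROOFS =====

-- the common reference value: mirrored products, first (n+1)/2 of them
def mirrorTake (l : List Int) : List Int :=
  ((l.zip l.reverse).map (fun p => p.1 * p.2)).take ((l.length + 1) / 2)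

-- A's loop body at a Nat index j < len: product of l[j] with its mirror l[len-1-j]
theorem bodyA_eq (l : List Int) (j : Nat) (hj : j < l.length) :
    PySem.List.pyGetD l (j : Int) 0 * PySem.List.pyGetD l ((j : Int) * (-1) - 1) 0
      = l[j] * l[l.length - 1 - j]'(by omega) := by
  have h1 : PySem.List.pyGetD l (j : Int) 0 = l[j] := by
    rw [PySem.List.pyGetD_natCast]; exact List.getD_eq_getElem l 0 hj
  have h2 : (j : Int) * (-1) - 1 = -(((j + 1 : Nat) : Int)) := by push_cast; ring
  rw [h1, h2, PySem.List.pyGetD_neg_natCast l (j + 1) 0 (by omega) (by omega)]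
  simp only [show l.length - (j + 1) = l.length - 1 - j from by omega]

-- the sliced mirror list at index j: the same product
theorem bodyB_eq (l : List Int) (k j : Nat) (hj : j < k) (hk : k ≤ l.length)
    (h : j < (((l.zip l.reverse).map (fun p => p.1 * p.2)).take k).length) :
    (((l.zip l.reverse).map (fun p => p.1 * p.2)).take k)[j]
      = l[j]'(by omega) * l[l.length - 1 - j]'(by omega) := by
  simp [List.getElem_take, List.getElem_map, List.getElem_zip, List.getElem_reverse]

-- A equals the mirrored-take form
theorem A_eq_mirrorTake (l : List Int) : get_pair_sum l = mirrorTake l := by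
  unfold mirrorTake
  unfold get_pair_sum
  simp only [PySem.List.foldl_append_singleton_eq_map, List.nil_append]
  have hmod : PySem.Int.mod ((l.length : Int)) 2 = ((l.length % 2 : Nat) : Int) := by
    exact_mod_cast PySem.Int.mod_natCast l.length 2
  have hdiv : PySem.Int.floordiv ((l.length : Int)) 2 = ((l.length / 2 : Nat) : Int) := by
    exact_mod_cast PySem.Int.floordiv_natCast l.length 2
  simp only [hmod, hdiv, PySem.List.pyRange_zero_natCast, List.map_map]
  split_ifs with he
  · -- even length
    have h2 : l.length % 2 = 0 := by exact_mod_cast he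
    apply List.ext_getElem
    · simp; omega
    · intro j hja hjb
      simp only [List.getElem_map, List.getElem_range, Function.comp_apply]
      have hjr : j < l.length / 2 := by simpa using hja
      rw [bodyA_eq l j (by omega), bodyB_eq l ((l.length + 1) / 2) j (by omega) (by omega)]
  · -- odd length
    have h2 : l.length % 2 = 1 := by
      have : ¬ l.length % 2 = 0 := by exact_mod_cast he
      omega
    apply List.ext_getElem
    · simp; omega
    · intro j hja hjb
      have hlen : j < l.length / 2 + 1 := by simpa using hja
      by_cases hcase : j < l.length / 2
      · rw [List.getElem_append_left (by simpa using hcase)]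
        simp only [List.getElem_map, List.getElem_range, Function.comp_apply]
        rw [bodyA_eq l j (by omega), bodyB_eq l ((l.length + 1) / 2) j (by omega) (by omega)]
      · have hj : j = l.length / 2 := by omega
        subst hj
        rw [List.getElem_append_right (by simp)]
        rw [bodyB_eq l ((l.length + 1) / 2) (l.length / 2) (by omega) (by omega)]
        have hmid : l.length - 1 - l.length / 2 = l.length / 2 := by omega
        simp only [List.getElem_singleton, hmid]
        rw [PySem.List.pyGetD_natCast, List.getD_eq_getElem l 0 (by omega)]
        ring

-- loop invariant for B's peel: having consumed k pairs, goB produces the remaining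
-- entries of mirrorTake appended to the accumulator
theorem goB_inv (l : List Int) (m : Nat) : ∀ (k : Nat) (acc : List Int),
    k + m = (l.length + 1) / 2 →
    goB (l.drop k) (l.reverse.drop k) ((l.length : Int) - 2 * k) acc
      = acc ++ (mirrorTake l).drop k := by
  induction m with
  | zero =>
    intro k acc hk
    have hlen : (mirrorTake l).length = (l.length + 1) / 2 := by
      unfold mirrorTake; simp; omega
    have hdrop : (mirrorTake l).drop k = [] := by
      apply List.drop_eq_nil_of_le; omega
    rw [hdrop, List.append_nil]
    rw [goB.eq_def]
    have h1 : ¬ ((l.length : Int) - 2 * k > 1) := by omega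
    have h2 : ¬ ((l.length : Int) - 2 * k = 1) := by omega
    simp [h1, h2]
  | succ m ih =>
    intro k acc hk
    have hkt : k < (l.length + 1) / 2 := by omega
    have hkn : k < l.length := by omega
    have hMlen : (((l.zip l.reverse).map (fun p => p.1 * p.2)).take ((l.length + 1) / 2)).length
        = (l.length + 1) / 2 := by simp; omega
    have hMk : k < (mirrorTake l).length := by unfold mirrorTake; omega
    have hdropM : (mirrorTake l).drop k
        = (mirrorTake l)[k] :: (mirrorTake l).drop (k + 1) :=
      List.drop_eq_getElem_cons hMk
    have hMkval : (mirrorTake l)[k]'hMk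
        = l[k]'hkn * l[l.length - 1 - k]'(by omega) := by
      unfold mirrorTake
      exact bodyB_eq l ((l.length + 1) / 2) k hkt (by omega) (by omega)
    have hfront : l.drop k = l[k]'hkn :: l.drop (k + 1) :=
      List.drop_eq_getElem_cons hkn
    have hkr : k < l.reverse.length := by simp; omega
    have hback : l.reverse.drop k = l.reverse[k]'hkr :: l.reverse.drop (k + 1) :=
      List.drop_eq_getElem_cons hkr
    have hrevk : l.reverse[k]'hkr = l[l.length - 1 - k]'(by omega) := by
      rw [List.getElem_reverse]
    by_cases hr : (l.length : Int) - 2 * k > 1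
    · -- pop both stacks, recurse
      rw [goB.eq_def]
      simp only [hr, if_pos, hfront, hback]
      have hstep : (l.length : Int) - 2 * k - 2 = (l.length : Int) - 2 * ((k + 1 : Nat) : Int) := by
        push_cast; ring
      rw [hstep]
      rw [ih (k + 1) (acc ++ [l[k]'hkn * l.reverse[k]'hkr]) (by omega)]
      rw [hdropM, hrevk, hMkval]
      simp
    · -- remaining = 1: square the middle
      have hone : (l.length : Int) - 2 * k = 1 := by omega
      have hmid : l.length - 1 - k = k := by omega
      simp only [hmid] at hMkval
      rw [goB.eq_def, hone]
      simp only [hfront]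
      norm_num
      have hdone : (mirrorTake l).drop (k + 1) = [] := by
        apply List.drop_eq_nil_of_le; unfold mirrorTake; omega
      rw [hdropM, hdone, hMkval]

theorem main_eq (l : List Int) : get_pair_sum l = get_pair_sum_alt l := by
  rw [A_eq_mirrorTake]
  unfold get_pair_sum_alt
  have h := goB_inv l ((l.length + 1) / 2) 0 [] (by omega)
  simpa using h.symm

-- ===== VERDICT (by name: the statement is the Claim_ definition above) =====
theorem get_pair_sum_spec : Claim_equal_get_pair_sum := by
  intro l _
  unfold Spec_get_pair_sum
  exact main_eq l
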